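-- pv_equiv track=rewrite | github.com/kabishou11/neihanzhikon | src/fastapi_qc/service.py | _summarize_live_verdicts
-- ===== SOURCE A (Python) =====
-- from typing import Any, Dict, Generator, List, Optional, Tuple
--
-- def _summarize_live_verdicts(verdicts: List[Dict[str, Any]]) -> Dict[str, Any]:
--     summary = {
--         "liveRules": 0,
--         "heuristicRules": 0,
--         "notApplicableRules": 0,
--         "heuristicFallbackRules": 0,
--         "liveErrorRules": 0,
--     }
--     for verdict in verdicts:
--         engine = (verdict.get("_engine") or "").strip()
--         if engine == "live":
--             summary["liveRules"] += 1
--         elif engine == "not_applicable":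
--             summary["notApplicableRules"] += 1
--         elif engine == "heuristic_fallback":
--             summary["heuristicFallbackRules"] += 1
--         elif engine == "live_error":
--             summary["liveErrorRules"] += 1
--         else:
--             summary["heuristicRules"] += 1
--     return summary
-- ===== SOURCE B (Python) =====
-- def _summarize_live_verdicts(verdicts):
--     engines = [(v.get("_engine") or "").strip() for v in verdicts]
--     live = engines.count("live")
--     not_applicable = engines.count("not_applicable")
--     heuristic_fallback = engines.count("heuristic_fallback")
--     live_error = engines.count("live_error")
--     return {
--         "liveRules": live,
--         "heuristicRules": len(engines) - live - not_applicable - heuristic_fallback - live_error,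
--         "notApplicableRules": not_applicable,
--         "heuristicFallbackRules": heuristic_fallback,
--         "liveErrorRules": live_error,
--     }
-- ===== Notes on version B (the rewrite author's own statement) =====
-- stated objective: alternative
-- what changed: B replaces A's single stateful pass with a five-way if/elif updating a mutable summary dict by staged passes: it first materializes the normalized engine list, then obtains each named count with a separate list.count scan and derives the catch-all heuristicRules arithmetically as length minus the four named counts, with no per-element branching or accumulator.
import Mathlib
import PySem

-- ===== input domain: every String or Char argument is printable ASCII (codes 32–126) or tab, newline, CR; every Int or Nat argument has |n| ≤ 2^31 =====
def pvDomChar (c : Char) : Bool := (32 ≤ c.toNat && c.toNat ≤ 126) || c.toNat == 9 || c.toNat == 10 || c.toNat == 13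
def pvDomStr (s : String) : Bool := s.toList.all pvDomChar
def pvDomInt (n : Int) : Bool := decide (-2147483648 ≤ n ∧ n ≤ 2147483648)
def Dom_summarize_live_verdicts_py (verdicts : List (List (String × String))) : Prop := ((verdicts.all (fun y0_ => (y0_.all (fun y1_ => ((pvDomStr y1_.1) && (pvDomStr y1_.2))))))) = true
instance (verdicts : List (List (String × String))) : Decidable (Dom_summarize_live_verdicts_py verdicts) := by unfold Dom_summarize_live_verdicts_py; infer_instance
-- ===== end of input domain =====

-- B replaces A's single stateful branching pass by staged passes: materialize the normalized
-- engine list, take four independent .count scans, and derive the catch-all by subtraction.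

-- ===== PORT A =====
-- `(verdict.get("_engine") or "").strip()` — get? returns none for a missing key; "" is falsy so
-- `or ""` is exactly `.getD ""` here (values are strings).
def pvEngine (verdict : List (String × String)) : String :=
  PySem.Str.strip (((PySem.Dict.mk verdict).get? "_engine").getD "")

def summarize_live_verdicts_py (verdicts : List (List (String × String))) : List (String × Int) :=
  let summary : PySem.Dict String Int :=
    PySem.Dict.mk [("liveRules", 0), ("heuristicRules", 0), ("notApplicableRules", 0),
                   ("heuristicFallbackRules", 0), ("liveErrorRules", 0)]
  let summary := verdicts.foldl (fun summary verdict =>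
    let engine := pvEngine verdict
    if engine = "live" then summary.modify "liveRules" 0 (· + 1)
    else if engine = "not_applicable" then summary.modify "notApplicableRules" 0 (· + 1)
    else if engine = "heuristic_fallback" then summary.modify "heuristicFallbackRules" 0 (· + 1)
    else if engine = "live_error" then summary.modify "liveErrorRules" 0 (· + 1)
    else summary.modify "heuristicRules" 0 (· + 1)) summary
  summary.items

-- ===== PORT B =====
def summarize_live_verdicts_py_alt (verdicts : List (List (String × String))) : List (String × Int) :=
  let engines := verdicts.map (fun v =>
    PySem.Str.strip (((PySem.Dict.mk v).get? "_engine").getD ""))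
  let live := PySem.List.count engines "live"
  let not_applicable := PySem.List.count engines "not_applicable"
  let heuristic_fallback := PySem.List.count engines "heuristic_fallback"
  let live_error := PySem.List.count engines "live_error"
  [("liveRules", live),
   ("heuristicRules", (engines.length : Int) - live - not_applicable - heuristic_fallback - live_error),
   ("notApplicableRules", not_applicable),
   ("heuristicFallbackRules", heuristic_fallback),
   ("liveErrorRules", live_error)]

-- ===== PRECONDITION & SPEC =====
def Spec_summarize_live_verdicts_py (verdicts : List (List (String × String))) (out : List (String × Int)) : Prop := out = summarize_live_verdicts_py_alt verdicts
instance (verdicts : List (List (String × String))) (out : List (String × Int)) : Decidable (Spec_summarize_live_verdicts_py verdicts out) := by unfold Spec_summarize_live_verdicts_py; infer_instance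

-- ===== CLAIM (what is proved, stated in full; the proofs are below) =====
def Claim_equal_summarize_live_verdicts_py : Prop := ∀ (verdicts : List (List (String × String))), Dom_summarize_live_verdicts_py verdicts → Spec_summarize_live_verdicts_py verdicts (summarize_live_verdicts_py verdicts)

-- ===== LEMMAS AND PROOFS =====

-- A's fold step and its characterisation on the 5-key literal dict, per-key counts.
def pvStep (summary : PySem.Dict String Int) (engine : String) : PySem.Dict String Int :=
  if engine = "live" then summary.modify "liveRules" 0 (· + 1)
  else if engine = "not_applicable" then summary.modify "notApplicableRules" 0 (· + 1)
  else if engine = "heuristic_fallback" then summary.modify "heuristicFallbackRules" 0 (· + 1)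
  else if engine = "live_error" then summary.modify "liveErrorRules" 0 (· + 1)
  else summary.modify "heuristicRules" 0 (· + 1)

def pvIsKnown (s : String) : Bool :=
  s = "live" ∨ s = "not_applicable" ∨ s = "heuristic_fallback" ∨ s = "live_error"

def pvDict5 (a b c d e : Int) : PySem.Dict String Int :=
  PySem.Dict.mk [("liveRules", a), ("heuristicRules", b), ("notApplicableRules", c),
                 ("heuristicFallbackRules", d), ("liveErrorRules", e)]

lemma foldA_char (l : List String) : ∀ (a b c d e : Int),
    l.foldl pvStep (pvDict5 a b c d e) =
    pvDict5 (a + l.count "live") (b + l.countP (fun s => !pvIsKnown s))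
      (c + l.count "not_applicable") (d + l.count "heuristic_fallback")
      (e + l.count "live_error") := by
  induction l with
  | nil => intro a b c d e; simp
  | cons x xs ih =>
    intro a b c d e
    by_cases h1 : x = "live"
    · subst h1
      calc List.foldl pvStep (pvDict5 a b c d e) ("live" :: xs)
          = List.foldl pvStep (pvDict5 (a + 1) b c d e) xs := rfl
        _ = _ := by rw [ih]; simp [pvDict5, pvIsKnown] at ih ⊢; omega
    · by_cases h2 : x = "not_applicable"
      · subst h2
        calc List.foldl pvStep (pvDict5 a b c d e) ("not_applicable" :: xs)
            = List.foldl pvStep (pvDict5 a b (c + 1) d e) xs := rfl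
          _ = _ := by rw [ih]; simp [pvDict5, pvIsKnown] at ih ⊢; omega
      · by_cases h3 : x = "heuristic_fallback"
        · subst h3
          calc List.foldl pvStep (pvDict5 a b c d e) ("heuristic_fallback" :: xs)
              = List.foldl pvStep (pvDict5 a b c (d + 1) e) xs := rfl
            _ = _ := by rw [ih]; simp [pvDict5, pvIsKnown] at ih ⊢; omega
        · by_cases h4 : x = "live_error"
          · subst h4
            calc List.foldl pvStep (pvDict5 a b c d e) ("live_error" :: xs)
                = List.foldl pvStep (pvDict5 a b c d (e + 1)) xs := rfl
              _ = _ := by rw [ih]; simp [pvDict5, pvIsKnown] at ih ⊢; omega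
          · calc List.foldl pvStep (pvDict5 a b c d e) (x :: xs)
                = List.foldl pvStep (pvStep (pvDict5 a b c d e) x) xs := List.foldl_cons ..
              _ = List.foldl pvStep (pvDict5 a (b + 1) c d e) xs := by
                    simp [pvStep, h1, h2, h3, h4, pvDict5, PySem.Dict.modify, PySem.Dict.contains,
                      PySem.Dict.insert, PySem.Dict.getD, PySem.Dict.get?]
              _ = _ := by
                    rw [ih]
                    simp [pvDict5, pvIsKnown, h1, h2, h3, h4]
                    omega

-- the four named counts plus the catch-all bucket account for every element
lemma count_partition (l : List String) :
    l.count "live" + l.count "not_applicable" + l.count "heuristic_fallback"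
      + l.count "live_error" + l.countP (fun s => !pvIsKnown s) = l.length := by
  induction l with
  | nil => simp
  | cons x xs ih =>
    by_cases h1 : x = "live"
    · simp [h1, pvIsKnown] at ih ⊢; omega
    · by_cases h2 : x = "not_applicable"
      · simp [h2, pvIsKnown] at ih ⊢; omega
      · by_cases h3 : x = "heuristic_fallback"
        · simp [h3, pvIsKnown] at ih ⊢; omega
        · by_cases h4 : x = "live_error"
          · simp [h4, pvIsKnown] at ih ⊢; omega
          · simp [h1, h2, h3, h4, pvIsKnown] at ih ⊢; omega

-- ===== VERDICT (by name: the statement is the Claim_ definition above) =====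
theorem summarize_live_verdicts_py_spec : Claim_equal_summarize_live_verdicts_py := by
  intro verdicts _
  unfold Spec_summarize_live_verdicts_py
  show (List.foldl (fun summary verdict => pvStep summary (pvEngine verdict))
      (pvDict5 0 0 0 0 0) verdicts).items = summarize_live_verdicts_py_alt verdicts
  rw [← List.foldl_map, foldA_char]
  have hp := count_partition (verdicts.map pvEngine)
  have hfun : (fun v : List (String × String) =>
      PySem.Str.strip (((PySem.Dict.mk v).get? "_engine").getD "")) = pvEngine := rfl
  simp only [summarize_live_verdicts_py_alt, hfun, pvDict5, PySem.List.count_eq,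
    List.length_map]
  simp only [List.length_map] at hp
  norm_num at hp ⊢
  omega
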